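-- pv_equiv track=rewrite | github.com/zikoBoss/generate | api/generate.py | dEcUiD
-- ===== SOURCE A (Python) =====
-- def dEcUiD(hEx):
--     n = s = 0
--     for b in bytes.fromhex(hEx):
--         n |= (b & 0x7F) << s
--         if not b & 0x80:
--             break
--         s += 7
--     return n
-- ===== SOURCE B (Python) =====
-- def dEcUiD(hEx):
--     bs = bytes.fromhex(hEx)
--     end = next((i for i, b in enumerate(bs) if not b & 0x80), len(bs) - 1)
--     n = 0
--     for b in reversed(bs[:end + 1]):
--         n = (n << 7) | (b & 0x7F)
--     return n
-- ===== Notes on version B (the rewrite author's own statement) =====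
-- stated objective: alternative
-- what changed: Replaces A's single early-breaking loop that ORs each 7-bit group at a growing shift into the accumulator with a two-phase decomposition: first find the terminator byte (first byte with the 0x80 bit clear), then fold the sliced prefix in reverse with n = (n << 7) | (b & 0x7F), building the value high-to-low.
import Mathlib
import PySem

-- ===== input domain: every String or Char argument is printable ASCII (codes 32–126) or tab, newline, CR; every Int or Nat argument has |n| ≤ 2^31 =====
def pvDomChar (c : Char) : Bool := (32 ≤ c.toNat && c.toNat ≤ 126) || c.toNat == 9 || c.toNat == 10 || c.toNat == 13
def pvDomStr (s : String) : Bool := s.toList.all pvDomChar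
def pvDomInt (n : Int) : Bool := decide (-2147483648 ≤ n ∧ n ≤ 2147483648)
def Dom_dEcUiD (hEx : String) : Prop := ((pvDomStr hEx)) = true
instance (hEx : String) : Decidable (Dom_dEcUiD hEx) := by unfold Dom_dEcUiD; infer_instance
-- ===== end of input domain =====

-- B re-decomposes A's single early-breaking accumulation loop into a terminator search
-- plus a reversed high-to-low shift-or fold (objective: alternative; same O(n) cost).

-- ===== PORT A =====

-- shared model of Python's bytes.fromhex: whitespace is skipped between byte pairs,
-- each byte is two adjacent hex digits; none = ValueError (excluded by Pre_).
def pvIsWs (c : Char) : Bool :=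
  c == ' ' || c == '\t' || c == '\n' || c == '\r' || c == '\x0b' || c == '\x0c'

def pvHexVal? (c : Char) : Option Nat :=
  if '0' ≤ c ∧ c ≤ '9' then some (c.toNat - '0'.toNat)
  else if 'a' ≤ c ∧ c ≤ 'f' then some (c.toNat - 'a'.toNat + 10)
  else if 'A' ≤ c ∧ c ≤ 'F' then some (c.toNat - 'A'.toNat + 10)
  else none

def pvFromhex? : List Char → Option (List Nat)
  | [] => some []
  | c :: t =>
    if pvIsWs c then pvFromhex? t
    else
      match pvHexVal? c with
      | none => none
      | some hi =>
        match t with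
        | [] => none
        | d :: t' =>
          match pvHexVal? d with
          | none => none
          | some lo => (pvFromhex? t').map (fun r => (16 * hi + lo) :: r)

-- A's loop: n |= (b & 0x7F) << s; break on clear 0x80; s += 7  (byte values are 0..255, so Nat)
def pvGoA : List Nat → Nat → Nat → Nat
  | [], n, _ => n
  | b :: t, n, s =>
    let n' := n ||| ((b &&& 0x7F) <<< s)
    if b &&& 0x80 == 0 then n' else pvGoA t n' (s + 7)

def dEcUiD (hEx : String) : Int :=
  match pvFromhex? hEx.toList with
  | none => 0          -- unreachable under Pre_ (Python raises ValueError here)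
  | some bs => (pvGoA bs 0 0 : Int)

-- ===== PORT B =====

def dEcUiD_alt (hEx : String) : Int :=
  match pvFromhex? hEx.toList with
  | none => 0          -- unreachable under Pre_ (Python raises ValueError here)
  | some bs =>
    -- end = first index whose 0x80 bit is clear (default: last index)
    let pre : List Nat :=
      match bs.findIdx? (fun b => b &&& 0x80 == 0) with
      | some i => bs.take (i + 1)
      | none => bs     -- bs[:len(bs)-1+1] = bs
    ((pre.reverse.foldl (fun n b => (n <<< 7) ||| (b &&& 0x7F)) 0 : Nat) : Int)

-- ===== PRECONDITION & SPEC =====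
def pvIsHexDig (c : Char) : Bool :=
  ('0' ≤ c && c ≤ '9') || ('a' ≤ c && c ≤ 'f') || ('A' ≤ c && c ≤ 'F')

-- Pre_ excludes exactly the strings on which bytes.fromhex (hence A) raises ValueError:
-- every char is a hex digit or whitespace, the hex digits pair up evenly, and
-- whitespace occurs only at byte boundaries (after an even number of hex digits).
def Pre_dEcUiD (hEx : String) : Prop :=
  (hEx.toList.all (fun c => pvIsHexDig c || pvIsWs c)) = true ∧
  (hEx.toList.countP (fun c => !pvIsWs c)) % 2 = 0 ∧
  ((List.range hEx.toList.length).all (fun i =>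
      !pvIsWs (hEx.toList.getD i ' ') ||
      ((hEx.toList.take i).countP (fun c => !pvIsWs c)) % 2 == 0)) = true
instance (hEx : String) : Decidable (Pre_dEcUiD hEx) := by unfold Pre_dEcUiD; infer_instance

def pvWitness_dEcUiD : String := "8e 02"

def Spec_dEcUiD (hEx : String) (out : Int) : Prop := out = dEcUiD_alt hEx
instance (hEx : String) (out : Int) : Decidable (Spec_dEcUiD hEx out) := by unfold Spec_dEcUiD; infer_instance

-- ===== CLAIM (what is proved, stated in full; the proofs are below) =====
def Claim_equal_dEcUiD : Prop := ∀ (hEx : String), Dom_dEcUiD hEx → Pre_dEcUiD hEx → Spec_dEcUiD hEx (dEcUiD hEx)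

-- ===== LEMMAS AND PROOFS =====

-- the common value of both loops: base-128 value of the 7-bit groups, low group first
def pvVal : List Nat → Nat
  | [] => 0
  | b :: t => (b &&& 0x7F) + 128 * pvVal t

-- the prefix both programs effectively consume
def pvPref (bs : List Nat) : List Nat :=
  match bs.findIdx? (fun b => b &&& 0x80 == 0) with
  | some i => bs.take (i + 1)
  | none => bs

theorem pv_lor_shift_add (s : Nat) : ∀ n c : Nat, n < 2 ^ s → n ||| (c <<< s) = n + c * 2 ^ s := by
  induction s with
  | zero =>
    intro n c h
    have : n = 0 := by omega
    simp [this, Nat.shiftLeft_eq]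
  | succ s ih =>
    intro n c h
    have hdiv : (c <<< (s + 1)) / 2 = c <<< s := by
      simp [Nat.shiftLeft_eq, pow_succ]
      rw [← Nat.mul_assoc, Nat.mul_div_cancel _ (by norm_num)]
    have hmod : (c <<< (s + 1)) % 2 = 0 := by
      simp [Nat.shiftLeft_eq, pow_succ, ← Nat.mul_assoc]
    have e1 : (n ||| c <<< (s + 1)) = 2 * ((n / 2) ||| ((c <<< (s + 1)) / 2)) + (n ||| c <<< (s + 1)) % 2 := by
      rw [← Nat.or_div_two]; omega
    have hor := @Nat.or_mod_two_eq_one n (c <<< (s + 1))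
    have hih := ih (n / 2) c (by omega)
    have hp : (2 : Nat) ^ (s + 1) = 2 * 2 ^ s := by ring
    rw [hdiv] at e1
    omega

theorem pvPref_cons_stop (b : Nat) (t : List Nat) (h : b &&& 0x80 == 0) :
    pvPref (b :: t) = [b] := by
  simp [pvPref, List.findIdx?_cons, h]

theorem pvPref_cons_go (b : Nat) (t : List Nat) (h : ¬ (b &&& 0x80 == 0)) :
    pvPref (b :: t) = b :: pvPref t := by
  simp only [pvPref, List.findIdx?_cons, if_neg h]
  cases hf : List.findIdx? (fun b => b &&& 0x80 == 0) t <;> simp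

theorem pvGoA_val (bs : List Nat) : ∀ n s : Nat, n < 2 ^ s →
    pvGoA bs n s = n + 2 ^ s * pvVal (pvPref bs) := by
  induction bs with
  | nil => intro n s h; simp [pvGoA, pvPref, pvVal]
  | cons b t ih =>
    intro n s h
    by_cases hb : b &&& 0x80 == 0
    · rw [pvPref_cons_stop b t hb]
      simp only [pvGoA, hb]
      rw [pv_lor_shift_add s n (b &&& 0x7F) h]
      simp [pvVal]; ring
    · rw [pvPref_cons_go b t hb]
      simp only [pvGoA, hb]
      rw [pv_lor_shift_add s n (b &&& 0x7F) h]
      have hble : b &&& 0x7F ≤ 127 := Nat.and_le_right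
      have hlt : n + (b &&& 0x7F) * 2 ^ s < 2 ^ (s + 7) := by
        have : (2 : Nat) ^ (s + 7) = 2 ^ s * 128 := by ring
        nlinarith
      rw [ih (n + (b &&& 0x7F) * 2 ^ s) (s + 7) hlt]
      have : (2 : Nat) ^ (s + 7) = 2 ^ s * 128 := by ring
      simp [pvVal, this]; ring

theorem pvVal_append (xs : List Nat) (b : Nat) :
    pvVal (xs ++ [b]) = pvVal xs + 128 ^ xs.length * (b &&& 0x7F) := by
  induction xs with
  | nil => simp [pvVal]
  | cons x t ih => simp [pvVal, ih, pow_succ]; ring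

theorem pvFoldB (m : List Nat) : ∀ n : Nat,
    m.foldl (fun n b => (n <<< 7) ||| (b &&& 0x7F)) n = n * 128 ^ m.length + pvVal m.reverse := by
  induction m with
  | nil => intro n; simp [pvVal]
  | cons b t ih =>
    intro n
    have hstep : (n <<< 7) ||| (b &&& 0x7F) = n * 128 + (b &&& 0x7F) := by
      have hb : b &&& 0x7F < 2 ^ 7 := by
        have : b &&& 0x7F ≤ 127 := Nat.and_le_right
        omega
      rw [Nat.lor_comm, pv_lor_shift_add 7 (b &&& 0x7F) n hb]; ring
    simp only [List.foldl_cons, hstep, ih, List.reverse_cons, pvVal_append,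
      List.length_reverse, List.length_cons]
    ring

-- ===== VERDICT (by name: the statement is the Claim_ definition above) =====
theorem dEcUiD_spec : Claim_equal_dEcUiD := by
  intro hEx _ _
  unfold Spec_dEcUiD dEcUiD dEcUiD_alt
  cases hp : pvFromhex? hEx.toList with
  | none => rfl
  | some bs =>
    simp only
    have hA := pvGoA_val bs 0 0 (by norm_num)
    have hB := pvFoldB (pvPref bs).reverse 0
    rw [List.reverse_reverse] at hB
    have : (match bs.findIdx? (fun b => b &&& 0x80 == 0) with
            | some i => bs.take (i + 1)
            | none => bs) = pvPref bs := rfl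
    rw [this, hA, hB]
    simp
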